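-- pv_equiv track=rewrite | github.com/Anh26535D/CustomerSegmentation | EncodeDay.py | toRecency
-- ===== SOURCE A (Python) =====
-- def toRecency(data, upper_):
--     enc = [upper_]
--     enc[0] = 1
--     for x in range(1, upper_):
--         if data[x] == data[x-1]:
--             enc.append(enc[x-1])
--         else:
--             enc.append(enc[x-1]+1)
--     for x in range(0, upper_):
--         enc[x] = enc[upper_ - 1] - enc[x] + 1
--
--     return enc
-- ===== SOURCE B (Python) =====
-- def toRecency(data, upper_):
--     if upper_ <= 1:
--         return [1]
--     enc = [1]
--     for x in range(upper_ - 2, -1, -1):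
--         last = enc[-1]
--         enc.append(last if data[x] == data[x + 1] else last + 1)
--     enc.reverse()
--     return enc
-- ===== Notes on version B (the rewrite author's own statement) =====
-- stated objective: alternative
-- what changed: B replaces A's two forward passes (build ascending run-ranks, then rewrite the whole list against the last rank) by a single backward pass that emits the final recency ranks directly (plus one reverse), so A's second index-rewriting loop disappears.
import Mathlib
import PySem

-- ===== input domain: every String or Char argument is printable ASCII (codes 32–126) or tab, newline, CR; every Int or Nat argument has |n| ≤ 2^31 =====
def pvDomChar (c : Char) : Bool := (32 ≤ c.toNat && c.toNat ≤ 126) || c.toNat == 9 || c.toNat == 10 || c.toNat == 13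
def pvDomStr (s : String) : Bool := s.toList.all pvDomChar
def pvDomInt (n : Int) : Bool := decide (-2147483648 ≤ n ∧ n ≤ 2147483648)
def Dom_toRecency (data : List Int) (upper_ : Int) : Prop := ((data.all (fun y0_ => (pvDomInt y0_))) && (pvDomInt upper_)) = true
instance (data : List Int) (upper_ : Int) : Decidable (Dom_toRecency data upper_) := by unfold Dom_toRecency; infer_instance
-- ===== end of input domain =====

-- B merges A's two forward passes into one backward pass that emits the final recency ranks
-- directly, then reverses once (alternative decomposition); return values agree wherever A returns.

-- ===== PORT A =====
def toRecency (data : List Int) (upper_ : Int) : List Int :=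
  let enc := [upper_]
  let enc := PySem.List.pySetD enc 0 1
  let enc := (PySem.List.pyRange 1 upper_ 1).foldl (fun enc x =>
    if PySem.List.pyGetD data x 0 = PySem.List.pyGetD data (x - 1) 0 then
      enc ++ [PySem.List.pyGetD enc (x - 1) 0]
    else
      enc ++ [PySem.List.pyGetD enc (x - 1) 0 + 1]) enc
  let enc := (PySem.List.pyRange 0 upper_ 1).foldl (fun enc x =>
    PySem.List.pySetD enc x (PySem.List.pyGetD enc (upper_ - 1) 0 - PySem.List.pyGetD enc x 0 + 1)) enc
  enc

-- ===== PORT B =====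
def toRecency_alt (data : List Int) (upper_ : Int) : List Int :=
  if upper_ ≤ 1 then [1]
  else
    ((PySem.List.pyRange (upper_ - 2) (-1) (-1)).foldl (fun enc x =>
      let last := PySem.List.pyGetD enc (-1) 0
      enc ++ [if PySem.List.pyGetD data x 0 = PySem.List.pyGetD data (x + 1) 0 then last else last + 1])
      [1]).reverse

-- ===== PRECONDITION & SPEC =====
-- Pre_ excludes only inputs on which A raises IndexError: upper_ ≥ 2 with upper_ > len(data)
-- (for upper_ ≤ 1 A never indexes data and returns [1]).
def Pre_toRecency (data : List Int) (upper_ : Int) : Prop :=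
  upper_ ≤ (data.length : Int) ∨ upper_ ≤ 1
instance (data : List Int) (upper_ : Int) : Decidable (Pre_toRecency data upper_) := by
  unfold Pre_toRecency; infer_instance
def pvWitness_toRecency : List Int × Int := ([3, 3, 5], 3)

def Spec_toRecency (data : List Int) (upper_ : Int) (out : List Int) : Prop :=
  out = toRecency_alt data upper_
instance (data : List Int) (upper_ : Int) (out : List Int) : Decidable (Spec_toRecency data upper_ out) := by
  unfold Spec_toRecency; infer_instance

-- ===== CLAIM (what is proved, stated in full; the proofs are below) =====
def Claim_equal_toRecency : Prop := ∀ (data : List Int) (upper_ : Int), Dom_toRecency data upper_ → Pre_toRecency data upper_ → Spec_toRecency data upper_ (toRecency data upper_)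

-- ===== LEMMAS AND PROOFS =====

-- ascending run rank of position j (A's first pass, as a function of the index)
def rk (data : List Int) : Nat → Int
  | 0 => 1
  | j + 1 => rk data j + (if data.getD (j + 1) 0 = data.getD j 0 then 0 else 1)

-- recency rank of position x among n positions (what both programs return at x)
def sk (data : List Int) (n x : Nat) : Int := rk data (n - 1) - rk data x + 1

theorem rk_step (data : List Int) (j : Nat) :
    rk data (j + 1) = rk data j + (if data.getD (j + 1) 0 = data.getD j 0 then 0 else 1) := rfl

theorem sk_last (data : List Int) (n : Nat) : sk data n (n - 1) = 1 := by
  simp [sk]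

theorem sk_step (data : List Int) (n x : Nat) :
    sk data n x = sk data n (x + 1) + (if data.getD x 0 = data.getD (x + 1) 0 then 0 else 1) := by
  simp only [sk, rk_step]
  have : (data.getD (x + 1) 0 = data.getD x 0) ↔ (data.getD x 0 = data.getD (x + 1) 0) := eq_comm
  split_ifs with h1 h2 h2 <;> simp_all <;> ring

theorem toRecency_spec_lemma_A1 (data : List Int) (n : Nat) (m : Nat) (hm : m + 1 ≤ n) :
    ((List.range m).map (fun (k : Nat) => (1 : Int) + (k : Int))).foldl (fun enc x =>
      if PySem.List.pyGetD data x 0 = PySem.List.pyGetD data (x - 1) 0 then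
        enc ++ [PySem.List.pyGetD enc (x - 1) 0]
      else
        enc ++ [PySem.List.pyGetD enc (x - 1) 0 + 1]) [1]
    = (List.range (m + 1)).map (rk data) := by
  induction m with
  | zero => simp [rk]
  | succ m ih =>
    have ih' := ih (by omega)
    rw [List.range_succ, List.map_append, List.foldl_append, ih']
    simp only [List.map_cons, List.map_nil, List.foldl_cons, List.foldl_nil]
    have hx2 : (1 : Int) + (m : Int) = (((m + 1 : Nat)) : Int) := by push_cast; ring
    have hx3 : (((m + 1 : Nat)) : Int) - 1 = ((m : Nat) : Int) := by push_cast; ring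
    rw [hx2, hx3, PySem.List.pyGetD_natCast, PySem.List.pyGetD_natCast, PySem.List.pyGetD_natCast]
    have hgets : ((List.range (m + 1)).map (rk data)).getD m 0 = rk data m := by
      simp [List.getD]
    rw [hgets]
    have hd1 : (List.range (m + 1 + 1)).map (rk data) = (List.range (m + 1)).map (rk data) ++ [rk data (m + 1)] := by
      rw [List.range_succ, List.map_append]; simp
    rw [hd1, rk_step]
    split_ifs <;> simp

theorem set_map_range_ite (f g : Nat → Int) (n m : Nat) :
    ((List.range n).map (fun j => if j < m then f j else g j)).set m (f m)
    = (List.range n).map (fun j => if j < m + 1 then f j else g j) := by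
  apply List.ext_getElem
  · simp
  · intro i h1 h2
    simp only [List.getElem_set, List.getElem_map, List.getElem_range] at *
    by_cases hi : m = i
    · subst hi; simp
    · have : (i < m) ↔ (i < m + 1) := by omega
      simp [hi, this]

theorem toRecency_spec_lemma_A2 (data : List Int) (n : Nat) (hn : 1 ≤ n) (m : Nat) (hm : m ≤ n) :
    ((List.range m).map (fun k => ((k : Nat) : Int))).foldl (fun enc x =>
      PySem.List.pySetD enc x (PySem.List.pyGetD enc (((n : Int)) - 1) 0 - PySem.List.pyGetD enc x 0 + 1))
      ((List.range n).map (rk data))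
    = (List.range n).map (fun j => if j < m then sk data n j else rk data j) := by
  induction m with
  | zero => simp
  | succ m ih =>
    have ih' := ih (by omega)
    rw [List.range_succ, List.map_append, List.foldl_append, ih']
    simp only [List.map_cons, List.map_nil, List.foldl_cons, List.foldl_nil]
    have hn1 : ((n : Int)) - 1 = (((n - 1 : Nat)) : Int) := by push_cast [hn]; ring
    set enc := (List.range n).map (fun j => if j < m then sk data n j else rk data j) with henc
    have hget1 : PySem.List.pyGetD enc (((n : Int)) - 1) 0 = rk data (n - 1) := by
      rw [hn1, PySem.List.pyGetD_natCast, henc]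
      have h1 : n - 1 < n := by omega
      have h2 : ¬ (n - 1 < m) := by omega
      simp [List.getD, h1, h2]
    have hget2 : PySem.List.pyGetD enc ((m : Nat) : Int) 0 = rk data m := by
      rw [PySem.List.pyGetD_natCast, henc]
      have h1 : m < n := by omega
      simp [List.getD, h1]
    rw [hget1, hget2, PySem.List.pySetD_natCast, henc]
    have : rk data (n - 1) - rk data m + 1 = sk data n m := rfl
    rw [this]
    exact set_map_range_ite (sk data n) (rk data) n m

theorem toRecency_spec_lemma_B (data : List Int) (n : Nat) (a m : Nat) (ham : a + m = n - 1) :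
    ((List.range' a m).map (fun k => ((k : Nat) : Int))).foldr (fun x enc =>
      (if PySem.List.pyGetD data x 0 = PySem.List.pyGetD data (x + 1) 0 then
        PySem.List.pyGetD enc 0 0 else PySem.List.pyGetD enc 0 0 + 1) :: enc) [1]
    = (List.range' a (m + 1)).map (sk data n) := by
  induction m generalizing a with
  | zero =>
    have : a = n - 1 := by omega
    subst this
    simp [sk_last data n]
  | succ m ih =>
    have ih' := ih (a + 1) (by omega)
    rw [List.range'_succ, List.map_cons, List.foldr_cons, ih']
    have hne : (List.range' (a + 1) (m + 1)).map (sk data n) = sk data n (a + 1) :: (List.range' (a + 1 + 1) m).map (sk data n) := by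
      rw [List.range'_succ]; simp
    have hhead : PySem.List.pyGetD ((List.range' (a + 1) (m + 1)).map (sk data n)) 0 0 = sk data n (a + 1) := by
      rw [hne, PySem.List.pyGetD_zero_cons]
    have hx1 : ((a : Nat) : Int) + 1 = (((a + 1 : Nat)) : Int) := by push_cast; ring
    rw [hhead, hx1]
    rw [List.range'_succ (s := a), List.map_cons]
    have hs := sk_step data n a
    have hda : PySem.List.pyGetD data ((a : Nat) : Int) 0 = data.getD a 0 := by
      rw [PySem.List.pyGetD_natCast]
    have hdb : PySem.List.pyGetD data (((a + 1 : Nat)) : Int) 0 = data.getD (a + 1) 0 := by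
      rw [PySem.List.pyGetD_natCast]
    rw [hda, hdb, hne]
    congr 1
    rw [hs]
    split_ifs <;> ring

theorem toRecency_eq_map_sk (data : List Int) (upper_ : Int)
    (h0 : 0 < upper_) :
    toRecency data upper_ = (List.range upper_.toNat).map (sk data upper_.toNat) := by
  set n := upper_.toNat with hn
  have hu : upper_ = (n : Int) := by omega
  have hn1 : 1 ≤ n := by omega
  simp only [toRecency]
  rw [hu]
  have hr1 : PySem.List.pyRange 1 (n : Int) 1 = (List.range (n - 1)).map (fun (k : Nat) => (1 : Int) + (k : Int)) := by
    rw [PySem.List.pyRange_one]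
    have h : ((n : Int) - 1).toNat = n - 1 := by omega
    rw [h]
  have hr0 : PySem.List.pyRange 0 (n : Int) 1 = (List.range n).map (fun k => ((k : Nat) : Int)) := by
    rw [PySem.List.pyRange_one]
    have : ((n : Int) - 0).toNat = n := by omega
    rw [this]; simp
  rw [hr1, hr0]
  have hA1 := toRecency_spec_lemma_A1 data n (n - 1) (by omega)
  have hset : (PySem.List.pySetD [(n : Int)] 0 1) = [(1 : Int)] := by
    simp [PySem.List.pySetD, PySem.List.pySet?, PySem.List.pyIdx?]
  rw [hset, hA1]
  have : n - 1 + 1 = n := by omega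
  rw [this]
  have hA2 := toRecency_spec_lemma_A2 data n hn1 n (le_refl n)
  rw [hA2]
  apply List.map_congr_left
  intro j hj
  simp only [List.mem_range] at hj
  simp [hj]

-- appending while peeking at the last element builds the reverse of consing while peeking at the head
theorem fold_append_rev (data : List Int) (l : List Int) : ∀ (acc : List Int), acc ≠ [] →
    l.foldl (fun enc x =>
      enc ++ [if PySem.List.pyGetD data x 0 = PySem.List.pyGetD data (x + 1) 0 then
        PySem.List.pyGetD enc (-1) 0 else PySem.List.pyGetD enc (-1) 0 + 1]) acc
    = (l.foldl (fun enc x =>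
      (if PySem.List.pyGetD data x 0 = PySem.List.pyGetD data (x + 1) 0 then
        PySem.List.pyGetD enc 0 0 else PySem.List.pyGetD enc 0 0 + 1) :: enc) acc.reverse).reverse := by
  induction l with
  | nil => intro acc h; simp
  | cons x l ih =>
    intro acc h
    rcases List.eq_nil_or_concat acc with rfl | ⟨as, a, rfl⟩
    · exact absurd rfl h
    · simp only [List.concat_eq_append, List.foldl_cons]
      rw [PySem.List.pyGetD_neg_one_append_singleton]
      have hrev : (as ++ [a]).reverse = a :: as.reverse := by simp
      rw [hrev, PySem.List.pyGetD_zero_cons]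
      set v := if PySem.List.pyGetD data x 0 = PySem.List.pyGetD data (x + 1) 0 then a else a + 1 with hv
      have happ : ((as ++ [a]) ++ [v]).reverse = v :: a :: as.reverse := by simp
      rw [ih ((as ++ [a]) ++ [v]) (by simp), happ]

theorem toRecency_alt_eq_map_sk (data : List Int) (upper_ : Int)
    (h0 : 1 < upper_) :
    toRecency_alt data upper_ = (List.range upper_.toNat).map (sk data upper_.toNat) := by
  set n := upper_.toNat with hn
  have hu : upper_ = (n : Int) := by omega
  have hn1 : 1 ≤ n := by omega
  unfold toRecency_alt
  rw [if_neg (by omega)]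
  have hstep : (fun (enc : List Int) (x : Int) =>
      let last := PySem.List.pyGetD enc (-1) 0
      enc ++ [if PySem.List.pyGetD data x 0 = PySem.List.pyGetD data (x + 1) 0 then last else last + 1])
      = (fun enc x =>
      enc ++ [if PySem.List.pyGetD data x 0 = PySem.List.pyGetD data (x + 1) 0 then
        PySem.List.pyGetD enc (-1) 0 else PySem.List.pyGetD enc (-1) 0 + 1]) := rfl
  rw [hstep, fold_append_rev data _ [1] (by simp), List.reverse_reverse]
  have hone : ([(1 : Int)].reverse) = [(1 : Int)] := by simp
  rw [hone]
  have hrev : PySem.List.pyRange (upper_ - 2) (-1) (-1) = (PySem.List.pyRange 0 (upper_ - 1) 1).reverse := by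
    have h := PySem.List.pyRange_neg_one_eq_reverse (upper_ - 2) (-1)
    have h2 : upper_ - 2 + 1 = upper_ - 1 := by ring
    have h3 : (-1 : Int) + 1 = 0 := by ring
    rw [h2, h3] at h
    exact h
  have hr : PySem.List.pyRange 0 (upper_ - 1) 1 = (List.range' 0 (n - 1)).map (fun k => ((k : Nat) : Int)) := by
    rw [PySem.List.pyRange_one]
    have : (upper_ - 1 - 0).toNat = n - 1 := by omega
    rw [this, List.range_eq_range']; simp
  rw [hrev, hr, List.foldl_reverse]
  have hB := toRecency_spec_lemma_B data n 0 (n - 1) (by omega)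
  rw [hB]
  have : n - 1 + 1 = n := by omega
  rw [this, List.range_eq_range']

-- A never indexes data when upper_ ≤ 1 and returns its seed list [1]
theorem toRecency_le_one (data : List Int) (upper_ : Int) (h : upper_ ≤ 1) :
    toRecency data upper_ = [1] := by
  simp only [toRecency]
  have hset : (PySem.List.pySetD [upper_] 0 1) = [(1 : Int)] := by
    simp [PySem.List.pySetD, PySem.List.pySet?, PySem.List.pyIdx?]
  rw [PySem.List.pyRange_one_eq_nil (by omega), hset, List.foldl_nil]
  rcases lt_or_ge upper_ 1 with h0 | h0
  · rw [PySem.List.pyRange_one_eq_nil (by omega), List.foldl_nil]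
  · have h1 : upper_ = 1 := by omega
    subst h1
    have hr : PySem.List.pyRange 0 1 1 = [0] := by
      rw [show (1 : Int) = 0 + 1 from rfl]; exact PySem.List.pyRange_one_singleton 0
    rw [hr, List.foldl_cons, List.foldl_nil]
    norm_num [PySem.List.pyGetD_zero_cons, PySem.List.pySetD, PySem.List.pySet?, PySem.List.pyIdx?]

-- ===== VERDICT (by name: the statement is the Claim_ definition above) =====
theorem toRecency_spec : Claim_equal_toRecency := by
  intro data upper_ hdom hpre
  unfold Spec_toRecency
  by_cases h1 : upper_ ≤ 1
  · rw [toRecency_le_one data upper_ h1]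
    unfold toRecency_alt
    rw [if_pos h1]
  · rw [toRecency_eq_map_sk data upper_ (by omega), toRecency_alt_eq_map_sk data upper_ (by omega)]
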